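-- pv_equiv track=rewrite | github.com/Sheldonite/Website-testing | app/main.py | _parse_project_id_list
-- ===== SOURCE A (Python) =====
-- def _parse_project_id_list(values: object) -> list[int]:
--     raw_values = values if isinstance(values, list) else [values]
--     parsed: list[int] = []
--     for raw in raw_values:
--         for piece in str(raw or "").replace(",", " ").split():
--             try:
--                 value = int(piece)
--             except ValueError:
--                 continue
--             if value not in parsed:
--                 parsed.append(value)
--     return parsed
-- ===== SOURCE B (Python) =====
-- def _parse_project_id_list(values: object) -> list[int]:
--     raw_values = values if isinstance(values, list) else [values]
--     out: list[int] = []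
--     seen: set[int] = set()
--     for raw in raw_values:
--         buf = ""
--         for ch in str(raw or "") + " ":  # trailing sentinel flushes the last token
--             if ch == "," or ch.isspace():
--                 if buf:
--                     try:
--                         v = int(buf)
--                     except ValueError:
--                         v = None
--                     if v is not None and v not in seen:
--                         seen.add(v)
--                         out.append(v)
--                     buf = ""
--             else:
--                 buf += ch
--     return out
-- ===== Notes on version B (the rewrite author's own statement) =====
-- stated objective: alternative
-- what changed: Replaces A's per-raw replace+split tokenization and inner 'value not in parsed' list scans with a single character-level streaming scanner: an explicit token buffer flushed at ',' or whitespace, int() on the buffer, and a hash set of seen values for dedup.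
import Mathlib
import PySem

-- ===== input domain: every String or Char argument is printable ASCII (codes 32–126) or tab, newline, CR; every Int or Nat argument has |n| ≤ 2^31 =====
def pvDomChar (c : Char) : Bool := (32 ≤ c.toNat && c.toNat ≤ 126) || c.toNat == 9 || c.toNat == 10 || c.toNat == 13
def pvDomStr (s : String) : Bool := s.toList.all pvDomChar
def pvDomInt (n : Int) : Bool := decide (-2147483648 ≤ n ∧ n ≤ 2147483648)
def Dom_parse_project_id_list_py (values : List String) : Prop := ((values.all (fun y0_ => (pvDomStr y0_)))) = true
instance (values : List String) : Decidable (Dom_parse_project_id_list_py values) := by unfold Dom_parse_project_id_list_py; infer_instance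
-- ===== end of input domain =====

-- B replaces A's replace/split tokenization and 'value not in parsed' list scans by a single
-- character-level streaming scanner with an explicit token buffer and a set of seen values;
-- objective: a genuinely different (streaming) algorithm of similar cost.


-- ===== PORT A =====
-- 'values' is a list here, so 'raw_values = values'; 'str(raw or "")' on a string is
-- 'if raw = "" then "" else raw' (falsy test; str() of a str is the identity).
def parse_project_id_list_py (values : List String) : List Int :=
  values.foldl (fun parsed raw =>
    (PySem.Str.split₀ (PySem.Str.replace (if raw = "" then "" else raw) "," " ")).foldl
      (fun parsed piece =>
        match PySem.Int.ofStr? piece with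
        | none => parsed
        | some value => if value ∈ parsed then parsed else parsed ++ [value])
      parsed) []

-- ===== PORT B =====
-- one scanner step per character: flush the token buffer at ',' or whitespace, else extend it.
def pvStep (st : List Int × PySem.Set Int × List Char) (ch : Char) :
    List Int × PySem.Set Int × List Char :=
  if ch == ',' || PySem.Str.isspace ch then
    if st.2.2 ≠ [] then
      match PySem.Int.ofChars? st.2.2 with
      | some v => if v ∈ st.2.1 then (st.1, st.2.1, []) else (st.1 ++ [v], st.2.1.add v, [])
      | none => (st.1, st.2.1, [])
    else st
  else (st.1, st.2.1, st.2.2 ++ [ch])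

-- 'for ch in str(raw or "") + " "' : the characters of raw followed by the sentinel ' '.
def parse_project_id_list_py_alt (values : List String) : List Int :=
  (values.foldl (fun (st : List Int × PySem.Set Int) raw =>
      let r := ((if raw = "" then "" else raw).toList ++ [' ']).foldl pvStep (st.1, st.2, ([] : List Char))
      (r.1, r.2.1))
    ([], ([] : PySem.Set Int))).1

-- ===== PRECONDITION & SPEC =====
def Spec_parse_project_id_list_py (values : List String) (out : List Int) : Prop := out = parse_project_id_list_py_alt values
instance (values : List String) (out : List Int) : Decidable (Spec_parse_project_id_list_py values out) := by unfold Spec_parse_project_id_list_py; infer_instance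

-- ===== CLAIM (what is proved, stated in full; the proofs are below) =====
def Claim_equal_parse_project_id_list_py : Prop := ∀ (values : List String), Dom_parse_project_id_list_py values → Spec_parse_project_id_list_py values (parse_project_id_list_py values)

-- ===== LEMMAS AND PROOFS =====

-- ',' mapped to ' ' (what str.replace(",", " ") does pointwise)
def pvSub (c : Char) : Char := if c = ',' then ' ' else c

-- reference tokenizer: the tokens B's scanner emits from buffer 'buf' and remaining chars
def pvToks : List Char → List Char → List (List Char)
  | buf, [] => if buf.isEmpty then [] else [buf]
  | buf, c :: cs =>
    if c == ',' || PySem.Str.isspace c then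
      (if buf.isEmpty then pvToks [] cs else buf :: pvToks [] cs)
    else pvToks (buf ++ [c]) cs

-- A's per-token body
def pvTokStep (parsed : List Int) (t : List Char) : List Int :=
  match PySem.Int.ofChars? t with
  | none => parsed
  | some v => if v ∈ parsed then parsed else parsed ++ [v]

theorem pv_replace_go (cs : List Char) : ∀ (acc : List Char),
    PySem.Chars.replace.go [','] [' '] cs.length cs acc = acc.reverse ++ cs.map pvSub := by
  induction cs with
  | nil => intro acc; simp [PySem.Chars.replace.go]
  | cons c t ih =>
    intro acc
    simp only [List.length_cons, PySem.Chars.replace.go]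
    by_cases h : c = ','
    · simp [h, List.isPrefixOf, ih, pvSub]
    · simp [List.isPrefixOf, h, Ne.symm h, ih, pvSub]

theorem pv_replace (cs : List Char) :
    PySem.Chars.replace cs [','] [' '] = cs.map pvSub := by
  simp [PySem.Chars.replace, pv_replace_go]

theorem pv_isspace_sub (c : Char) :
    PySem.Chars.isspace (pvSub c) = (c == ',' || PySem.Str.isspace c) := by
  by_cases h : c = ','
  · subst h; decide
  · simp [pvSub, h, PySem.Str.isspace]

theorem pv_go_toks (cs : List Char) : ∀ (buf : List Char) (acc : List (List Char)),
    PySem.Chars.split₀.go (cs.map pvSub) buf.reverse acc = acc.reverse ++ pvToks buf cs := by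
  induction cs with
  | nil =>
    intro buf acc
    by_cases h : buf = [] <;>
      simp [PySem.Chars.split₀.go, pvToks, h]
  | cons c cs ih =>
    intro buf acc
    by_cases hs : (c == ',' || PySem.Str.isspace c) = true
    · have hsp : PySem.Chars.isspace (pvSub c) = true := by rw [pv_isspace_sub]; exact hs
      by_cases h : buf = []
      · subst h
        simpa [PySem.Chars.split₀.go, hsp, pvToks, hs] using ih [] acc
      · have := ih [] (buf :: acc)
        simp only [List.reverse_nil] at this
        simp [PySem.Chars.split₀.go, hsp, pvToks, hs, h, this]
    · have hsp : PySem.Chars.isspace (pvSub c) = false := by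
        rw [pv_isspace_sub]; exact Bool.not_eq_true _ ▸ (by simpa using hs)
      have hc : pvSub c = c := by
        simp only [Bool.or_eq_true, beq_iff_eq, not_or] at hs
        simp [pvSub, hs.1]
      have := ih (buf ++ [c]) acc
      simp only [List.reverse_append, List.reverse_cons, List.reverse_nil, List.nil_append,
        List.singleton_append] at this
      have hcsp : PySem.Chars.isspace c = false := hc ▸ hsp
      simp [PySem.Chars.split₀.go, hcsp, hc, pvToks, hs, this]

theorem pv_split_toks (s : String) :
    PySem.Str.split₀ (PySem.Str.replace s "," " ") = (pvToks [] s.toList).map String.ofList := by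
  have h := pv_go_toks s.toList [] []
  simp only [List.reverse_nil] at h
  simp [PySem.Str.split₀, PySem.Str.replace, PySem.Chars.split₀, pv_replace, h]

theorem pv_step_sep {c : Char} (h : (c == ',' || PySem.Str.isspace c) = true)
    (out seen : List Int) (buf : List Char) (hinv : ∀ v : Int, v ∈ seen ↔ v ∈ out) :
    ∃ seen', pvStep (out, seen, buf) c = (pvTokStep out buf, seen', []) ∧
      (∀ v : Int, v ∈ seen' ↔ v ∈ pvTokStep out buf) := by
  by_cases hb : buf = []
  · subst hb
    have hnil : PySem.Int.ofChars? [] = none := by decide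
    refine ⟨seen, ?_, ?_⟩ <;> simp [pvStep, pvTokStep, h, hnil, hinv]
  · cases hv : PySem.Int.ofChars? buf with
    | none => exact ⟨seen, by simp [pvStep, pvTokStep, h, hb, hv], by simp [pvTokStep, hv, hinv]⟩
    | some v =>
      by_cases hm : v ∈ seen
      · have hmo : v ∈ out := (hinv v).mp hm
        exact ⟨seen, by simp [pvStep, pvTokStep, h, hb, hv, hm, hmo],
          by simp [pvTokStep, hv, hmo, hinv]⟩
      · have hmo : v ∉ out := fun hx => hm ((hinv v).mpr hx)
        refine ⟨PySem.Set.add seen v, by simp [pvStep, pvTokStep, h, hb, hv, hm, hmo], ?_⟩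
        intro w
        simp [pvTokStep, hv, hmo, PySem.Set.add, hm, hinv]

theorem pv_scan (cs : List Char) : ∀ (buf : List Char) (out seen : List Int),
    (∀ v : Int, v ∈ seen ↔ v ∈ out) →
    ∃ seen', (cs ++ [' ']).foldl pvStep (out, seen, buf) =
        ((pvToks buf cs).foldl pvTokStep out, seen', []) ∧
      (∀ v : Int, v ∈ seen' ↔ v ∈ (pvToks buf cs).foldl pvTokStep out) := by
  induction cs with
  | nil =>
    intro buf out seen hinv
    obtain ⟨seen', h1, h2⟩ := pv_step_sep (c := ' ') (by decide) out seen buf hinv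
    refine ⟨seen', ?_, ?_⟩
    · simp only [List.nil_append, List.foldl_cons, List.foldl_nil, h1]
      by_cases hb : buf = [] <;> simp [pvToks, hb, pvTokStep, (by decide : PySem.Int.ofChars? [] = none)]
    · intro v
      rw [h2]
      by_cases hb : buf = [] <;> simp [pvToks, hb, pvTokStep, (by decide : PySem.Int.ofChars? [] = none)]
  | cons c cs ih =>
    intro buf out seen hinv
    by_cases hs : (c == ',' || PySem.Str.isspace c) = true
    · obtain ⟨seen1, h1, h2⟩ := pv_step_sep hs out seen buf hinv
      obtain ⟨seen', h3, h4⟩ := ih [] (pvTokStep out buf) seen1 h2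
      refine ⟨seen', ?_, ?_⟩
      · simp only [List.cons_append, List.foldl_cons, h1, h3, pvToks, hs, if_true]
        by_cases hb : buf = [] <;>
          simp [hb, pvTokStep, (by decide : PySem.Int.ofChars? [] = none)]
      · intro v
        rw [h4]
        simp only [pvToks, hs, if_true]
        by_cases hb : buf = [] <;>
          simp [hb, pvTokStep, (by decide : PySem.Int.ofChars? [] = none)]
    · have hstep : pvStep (out, seen, buf) c = (out, seen, buf ++ [c]) := by
        simp [pvStep, hs]
      obtain ⟨seen', h3, h4⟩ := ih (buf ++ [c]) out seen hinv
      exact ⟨seen', by simp only [List.cons_append, List.foldl_cons, hstep, h3, pvToks, hs, if_false,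
        Bool.false_eq_true], by simpa [pvToks, hs] using h4⟩

theorem pv_inner_bridge (l : List (List Char)) : ∀ (out : List Int),
    (l.map String.ofList).foldl
        (fun parsed piece =>
          match PySem.Int.ofStr? piece with
          | none => parsed
          | some value => if value ∈ parsed then parsed else parsed ++ [value]) out
      = l.foldl pvTokStep out := by
  induction l with
  | nil => intro out; rfl
  | cons t l ih =>
    intro out
    rw [List.map_cons, List.foldl_cons, List.foldl_cons, ih]
    congr 1
    simp [pvTokStep, PySem.Int.ofStr?]

theorem pv_main (values : List String) : ∀ (out seen : List Int),
    (∀ v : Int, v ∈ seen ↔ v ∈ out) →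
    ∃ seen', values.foldl (fun (st : List Int × PySem.Set Int) raw =>
        let r := ((if raw = "" then "" else raw).toList ++ [' ']).foldl pvStep (st.1, st.2, ([] : List Char))
        (r.1, r.2.1)) (out, seen)
      = (values.foldl (fun parsed raw =>
          (PySem.Str.split₀ (PySem.Str.replace (if raw = "" then "" else raw) "," " ")).foldl
            (fun parsed piece =>
              match PySem.Int.ofStr? piece with
              | none => parsed
              | some value => if value ∈ parsed then parsed else parsed ++ [value])
            parsed) out, seen') ∧
      (∀ v : Int, v ∈ seen' ↔ v ∈ values.foldl (fun parsed raw =>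
          (PySem.Str.split₀ (PySem.Str.replace (if raw = "" then "" else raw) "," " ")).foldl
            (fun parsed piece =>
              match PySem.Int.ofStr? piece with
              | none => parsed
              | some value => if value ∈ parsed then parsed else parsed ++ [value])
            parsed) out) := by
  induction values with
  | nil => intro out seen hinv; exact ⟨seen, rfl, hinv⟩
  | cons raw values ih =>
    intro out seen hinv
    obtain ⟨seen1, h1, h2⟩ := pv_scan (if raw = "" then "" else raw).toList [] out seen hinv
    obtain ⟨seen', h3, h4⟩ := ih _ seen1 h2
    refine ⟨seen', ?_, ?_⟩
    · simp only [List.foldl_cons, h1, pv_split_toks, pv_inner_bridge, h3]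
    · simpa [pv_split_toks, pv_inner_bridge] using h4

-- ===== VERDICT (by name: the statement is the Claim_ definition above) =====
theorem parse_project_id_list_py_spec : Claim_equal_parse_project_id_list_py := by
  intro values _
  unfold Spec_parse_project_id_list_py parse_project_id_list_py parse_project_id_list_py_alt
  obtain ⟨seen', h, -⟩ := pv_main values [] [] (by simp)
  rw [h]
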